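-- pv_equiv track=rewrite | github.com/davidrippel/sillytavern-ttrpg | pack_generator/pack_generator/writer.py | _unwrap_prose
-- ===== SOURCE A (Python) =====
-- def _unwrap_prose(value: str) -> str:
--     """Defensively undo any column wrapping the LLM may have applied.
--
--     Newlines that separate paragraphs (i.e. preceded/followed by another
--     newline) are preserved; single newlines inside a paragraph are
--     converted to spaces.
--     """
--     if not value:
--         return value
--     lines = value.split("\n")
--     out: list[str] = []
--     paragraph: list[str] = []
--     for line in lines:
--         if line.strip() == "":
--             if paragraph:
--                 out.append(" ".join(paragraph).strip())
--                 paragraph = []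
--             out.append("")
--         else:
--             paragraph.append(line.strip())
--     if paragraph:
--         out.append(" ".join(paragraph).strip())
--     # Collapse runs of blank lines.
--     cleaned: list[str] = []
--     for line in out:
--         if line == "" and cleaned and cleaned[-1] == "":
--             continue
--         cleaned.append(line)
--     return "\n".join(cleaned).strip()
-- ===== SOURCE B (Python) =====
-- def _take_run(lines):
--     """Split off the leading run of non-blank lines; return (run, rest)."""
--     if not lines or lines[0] == "":
--         return [], lines
--     run, rest = _take_run(lines[1:])
--     return [lines[0]] + run, rest
--
--
-- def _paragraphs(lines):
--     """Group already-stripped lines into paragraphs, dropping blanks."""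
--     if not lines:
--         return []
--     if lines[0] == "":
--         return _paragraphs(lines[1:])
--     run, rest = _take_run(lines)
--     return [" ".join(run)] + _paragraphs(rest)
--
--
-- def _unwrap_prose(value: str) -> str:
--     if not value:
--         return value
--     lines = [line.strip() for line in value.split("\n")]
--     return "\n\n".join(_paragraphs(lines))
-- ===== Notes on version B (the rewrite author's own statement) =====
-- stated objective: simpler
-- what changed: Replaces A's two-phase pipeline (emit empty-string markers per blank line, then a second pass collapsing consecutive markers, then a final strip of the joined text) with a single grouping pass: split the stripped lines into runs of non-blank lines, join each run with a space, and join the paragraphs with a double newline directly, so no blank markers, no collapse pass and no final strip are needed.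
import Mathlib
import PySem

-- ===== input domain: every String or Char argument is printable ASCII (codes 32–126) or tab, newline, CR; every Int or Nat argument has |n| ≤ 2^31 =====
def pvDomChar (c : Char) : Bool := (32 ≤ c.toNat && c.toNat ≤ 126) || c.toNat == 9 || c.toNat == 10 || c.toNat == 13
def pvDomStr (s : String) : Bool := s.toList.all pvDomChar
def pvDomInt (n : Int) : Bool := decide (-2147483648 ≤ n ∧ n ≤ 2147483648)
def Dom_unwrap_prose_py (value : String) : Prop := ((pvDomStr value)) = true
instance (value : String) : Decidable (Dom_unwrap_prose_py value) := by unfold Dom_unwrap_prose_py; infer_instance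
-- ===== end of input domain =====

-- B replaces A's two-phase blank-marker-and-collapse pipeline with one grouping pass
-- (runs of non-blank stripped lines joined by spaces, paragraphs joined by "\n\n"): simpler.

-- ===== PORT A =====
def unwrap_prose_py (value : String) : String :=
  if value == "" then value
  else
    let lines := (PySem.Str.split? value "\n").getD []
    let st := lines.foldl (fun (st : List String × List String) line =>
      if PySem.Str.strip line == "" then
        ((if st.2.isEmpty then st.1
          else st.1 ++ [PySem.Str.strip (PySem.Str.join " " st.2)]) ++ [""], [])
      else (st.1, st.2 ++ [PySem.Str.strip line])) ([], [])
    let out := if st.2.isEmpty then st.1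
               else st.1 ++ [PySem.Str.strip (PySem.Str.join " " st.2)]
    let cleaned := out.foldl (fun cleaned line =>
      if line == "" && !cleaned.isEmpty && (cleaned.getLastD "" == "") then cleaned
      else cleaned ++ [line]) []
    PySem.Str.strip (PySem.Str.join "\n" cleaned)

-- ===== PORT B =====
def pvTakeRun : List String → List String × List String
  | [] => ([], [])
  | l :: rest =>
    if l == "" then ([], l :: rest)
    else
      let p := pvTakeRun rest
      (l :: p.1, p.2)

-- length fact cited by pvParagraphs' termination proof
theorem pvTakeRun_snd_length_le : ∀ (ls : List String), (pvTakeRun ls).2.length ≤ ls.length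
  | [] => le_refl _
  | l :: rest => by
    by_cases h : l == ""
    · simp [pvTakeRun, h]
    · simpa [pvTakeRun, h] using Nat.le_succ_of_le (pvTakeRun_snd_length_le rest)

def pvParagraphs : List String → List String
  | [] => []
  | l :: rest =>
    if l == "" then pvParagraphs rest
    else
      let p := pvTakeRun (l :: rest)
      PySem.Str.join " " p.1 :: pvParagraphs p.2
termination_by ls => ls.length
decreasing_by
  · simp
  · rename_i h
    simp only [pvTakeRun, if_neg h]
    exact Nat.lt_succ_of_le (pvTakeRun_snd_length_le rest)

def unwrap_prose_py_alt (value : String) : String :=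
  if value == "" then value
  else
    let lines := ((PySem.Str.split? value "\n").getD []).map PySem.Str.strip
    PySem.Str.join "\n\n" (pvParagraphs lines)

-- ===== PRECONDITION & SPEC =====
def Spec_unwrap_prose_py (value : String) (out : String) : Prop := out = unwrap_prose_py_alt value
instance (value : String) (out : String) : Decidable (Spec_unwrap_prose_py value out) := by unfold Spec_unwrap_prose_py; infer_instance

-- ===== CLAIM (what is proved, stated in full; the proofs are below) =====
def Claim_equal_unwrap_prose_py : Prop := ∀ (value : String), Dom_unwrap_prose_py value → Spec_unwrap_prose_py value (unwrap_prose_py value)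

-- ===== LEMMAS AND PROOFS =====

-- abbreviations for the proof
def pvSP (s : String) : String := PySem.Str.strip s
def pvFlush (para : List String) : List String :=
  if para.isEmpty then [] else [pvSP (PySem.Str.join " " para)]

-- A's first loop, as a recursion over the (already stripped) line list
def pvG : List String → List String → List String
  | para, [] => pvFlush para
  | para, l :: ls =>
    if l == "" then pvFlush para ++ [""] ++ pvG [] ls
    else pvG (para ++ [l]) ls

-- A's collapse loop, as a recursion carrying "last emitted line is blank"
def pvColl : Bool → List String → List String
  | _, [] => []
  | b, l :: ls =>
    if l == "" then (if b then pvColl true ls else "" :: pvColl true ls)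
    else l :: pvColl false ls

def pvOptB (b : Bool) : List String := if b then [""] else []

-- clean char lists / strings: nonempty, no whitespace at either end
def pvCleanL (cs : List Char) : Prop :=
  cs ≠ [] ∧ PySem.Chars.isspace (cs.headD 'a') = false ∧ PySem.Chars.isspace (cs.getLastD 'a') = false
def pvCleanS (s : String) : Prop := pvCleanL s.toList

theorem pvG_spec (ls : List String) (out para : List String) :
    (let st := ls.foldl (fun (st : List String × List String) line =>
        if PySem.Str.strip line == "" then
          ((if st.2.isEmpty then st.1
            else st.1 ++ [PySem.Str.strip (PySem.Str.join " " st.2)]) ++ [""], [])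
        else (st.1, st.2 ++ [PySem.Str.strip line])) (out, para)
     if st.2.isEmpty then st.1
     else st.1 ++ [PySem.Str.strip (PySem.Str.join " " st.2)]) =
    out ++ pvG para (ls.map pvSP) := by
  induction ls generalizing out para with
  | nil => by_cases h : para.isEmpty <;> simp [pvG, pvFlush, pvSP, h]
  | cons l ls ih =>
    simp only [List.foldl_cons, List.map_cons, pvG]
    by_cases h : PySem.Str.strip l == ""
    · have h' : (pvSP l == "") = true := h
      simp only [h, ih, pvFlush, pvSP]
      by_cases hp : para.isEmpty <;> simp [hp]
    · have h' : (pvSP l == "") = false := by simpa using h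
      simp only [h, h', Bool.false_eq_true, if_false]
      exact ih out (para ++ [PySem.Str.strip l])

theorem pvColl_spec (xs acc : List String) :
    xs.foldl (fun cleaned line =>
      if line == "" && !cleaned.isEmpty && (cleaned.getLastD "" == "") then cleaned
      else cleaned ++ [line]) acc
    = acc ++ pvColl (!acc.isEmpty && (acc.getLastD "" == "")) xs := by
  induction xs generalizing acc with
  | nil => simp [pvColl]
  | cons l ls ih =>
    simp only [List.foldl_cons]
    by_cases hl : l = ""
    · subst hl
      cases hb : (!acc.isEmpty && (acc.getLastD "" == "")) with
      | true =>
        rw [if_pos (by simpa [List.getLastD] using hb), ih acc, hb]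
        simp [pvColl]
      | false =>
        rw [if_neg (by intro h; simp at h; simp [List.getLastD_eq_getLast?, h.1, h.2] at hb),
          ih (acc ++ [""])]
        have h2 : (!(acc ++ [""]).isEmpty && ((acc ++ [""]).getLastD "" == "")) = true := by simp
        rw [h2]
        simp [pvColl]
    · have hle : (l == "") = false := by simpa using hl
      rw [if_neg (by simp [hle]), ih (acc ++ [l])]
      simp [pvColl, hle]

-- takeRun facts
theorem pvTakeRun_append (ls : List String) : (pvTakeRun ls).1 ++ (pvTakeRun ls).2 = ls := by
  induction ls with
  | nil => simp [pvTakeRun]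
  | cons l rest ih =>
    by_cases h : l == "" <;> simp [pvTakeRun, h, ih]

theorem pvTakeRun_mem_ne (ls : List String) : ∀ x ∈ (pvTakeRun ls).1, x ≠ "" := by
  induction ls with
  | nil => simp [pvTakeRun]
  | cons l rest ih =>
    by_cases h : l == ""
    · simp [pvTakeRun, h]
    · intro x hx
      simp only [pvTakeRun, if_neg h, List.mem_cons] at hx
      rcases hx with rfl | hx
      · simpa using h
      · exact ih x hx

theorem pvTakeRun_rest (ls : List String) :
    (pvTakeRun ls).2 = [] ∨ ∃ t, (pvTakeRun ls).2 = "" :: t := by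
  induction ls with
  | nil => exact Or.inl rfl
  | cons l rest ih =>
    by_cases h : l == ""
    · right; exact ⟨rest, by simp only [pvTakeRun, if_pos h]; simpa using (by simpa using h : l = "") ▸ rfl⟩
    · simpa [pvTakeRun, h] using ih

theorem pvG_run (ls para : List String) :
    pvG para ls = pvG (para ++ (pvTakeRun ls).1) (pvTakeRun ls).2 := by
  induction ls generalizing para with
  | nil => simp [pvTakeRun]
  | cons l rest ih =>
    by_cases h : l == ""
    · simp [pvTakeRun, h]
    · simp only [pvG, pvTakeRun]
      rw [ih (para ++ [l])]
      simp [h]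

-- strip machinery at the char level
theorem pv_isspace_nl : PySem.Chars.isspace '\n' = true := by decide

theorem pv_dropWhile_nl (k : Nat) (xs : List Char) :
    List.dropWhile PySem.Chars.isspace (List.replicate k '\n' ++ xs) =
    List.dropWhile PySem.Chars.isspace xs := by
  induction k with
  | zero => simp
  | succ k ih =>
    rw [List.replicate_succ, List.cons_append, List.dropWhile_cons_of_pos pv_isspace_nl, ih]

theorem pv_sandwich (a b : Nat) (core : List Char) (h : pvCleanL core ∨ core = []) :
    PySem.Chars.strip (List.replicate a '\n' ++ core ++ List.replicate b '\n') = core := by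
  have hstrip : ∀ cs : List Char, PySem.Chars.strip cs =
      (List.dropWhile PySem.Chars.isspace
        ((List.dropWhile PySem.Chars.isspace cs).reverse)).reverse := fun _ => rfl
  rw [hstrip, List.append_assoc, pv_dropWhile_nl]
  rcases h with hc | rfl
  · obtain ⟨hne, hh, hl⟩ := hc
    obtain ⟨c, cs', rfl⟩ := List.exists_cons_of_ne_nil hne
    have hh' : PySem.Chars.isspace c = false := by simpa using hh
    rw [List.cons_append, List.dropWhile_cons_of_neg (by simp [hh'])]
    rw [← List.cons_append, List.reverse_append, List.reverse_replicate, pv_dropWhile_nl]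
    obtain ⟨ys, d, hyd⟩ := ((c :: cs').eq_nil_or_concat).resolve_left (by simp)
    rw [List.concat_eq_append] at hyd
    have hd : PySem.Chars.isspace d = false := by
      rw [hyd] at hl; simpa [List.getLastD_concat] using hl
    rw [hyd, List.reverse_append, List.reverse_singleton, List.singleton_append,
      List.dropWhile_cons_of_neg (by simp [hd])]
    simp
  · have : List.dropWhile PySem.Chars.isspace ([] ++ List.replicate b '\n') = [] := by
      simpa using pv_dropWhile_nl b []
    rw [this]
    simp

theorem pv_strip_clean (cs : List Char) (h : pvCleanL cs) : PySem.Chars.strip cs = cs := by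
  have := pv_sandwich 0 0 cs (Or.inl h); simpa using this

theorem pv_strip_shape (cs : List Char) :
    PySem.Chars.strip cs = [] ∨ pvCleanL (PySem.Chars.strip cs) := by
  have hstrip : PySem.Chars.strip cs =
      (List.dropWhile PySem.Chars.isspace
        ((List.dropWhile PySem.Chars.isspace cs).reverse)).reverse := rfl
  rw [hstrip]
  cases hLn : List.dropWhile PySem.Chars.isspace cs with
  | nil => left; simp
  | cons c t =>
    have hwc : List.dropWhile PySem.Chars.isspace cs ≠ [] := by rw [hLn]; simp
    have hc : PySem.Chars.isspace c = false := by
      have h0 := List.head_dropWhile_not PySem.Chars.isspace hwc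
      have h1 : (List.dropWhile PySem.Chars.isspace cs).head hwc = c := by
        simp only [hLn, List.head_cons]
      rwa [h1] at h0
    cases hR : List.dropWhile PySem.Chars.isspace (c :: t).reverse with
    | nil => left; simp
    | cons d u =>
      right
      have hwr : List.dropWhile PySem.Chars.isspace (c :: t).reverse ≠ [] := by rw [hR]; simp
      have hd : PySem.Chars.isspace d = false := by
        have h0 := List.head_dropWhile_not PySem.Chars.isspace hwr
        have h1 : (List.dropWhile PySem.Chars.isspace (c :: t).reverse).head hwr = d := by
          simp only [hR, List.head_cons]
        rwa [h1] at h0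
      have hdec : List.takeWhile PySem.Chars.isspace (c :: t).reverse ++ (d :: u) = (c :: t).reverse := by
        rw [← hR]; exact List.takeWhile_append_dropWhile
      have h2 : (d :: u).getLastD 'a' = ((c :: t).reverse).getLastD 'a' := by
        rw [← hdec, List.getLastD_eq_getLast?, List.getLastD_eq_getLast?, List.getLast?_append]
        cases hgl : (d :: u).getLast? with
        | none => simp [List.getLast?_eq_none_iff] at hgl
        | some e => simp
      have h23 : ((c :: t).reverse).getLastD 'a' = c := by
        simp [List.getLastD_eq_getLast?, List.getLast?_reverse]
      refine ⟨by simp, ?_, ?_⟩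
      · have hh : ((d :: u).reverse).headD 'a' = (d :: u).getLastD 'a' := by
          rw [List.headD_eq_head?, List.head?_reverse, List.getLastD_eq_getLast?]
        rw [hh, h2, h23]; exact hc
      · have hl : ((d :: u).reverse).getLastD 'a' = d := by
          simp [List.getLastD_eq_getLast?, List.getLast?_reverse]
        rw [hl]; exact hd

theorem pv_strip_idem (s : String) : pvSP (pvSP s) = pvSP s := by
  have h : ∀ t : String, (PySem.Str.strip t).toList = PySem.Chars.strip t.toList :=
    PySem.Str.toList_strip
  apply String.toList_inj.mp
  simp only [pvSP]
  rw [h, h]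
  rcases pv_strip_shape s.toList with h0 | hc
  · rw [h0]; rfl
  · exact pv_strip_clean _ hc

theorem pvCleanS_ne (s : String) (h : pvCleanS s) : s ≠ "" := by
  intro hs
  subst hs
  exact h.1 (by simp)

theorem pvCleanS_of_stripped (s : String) (h1 : pvSP s = s) (h2 : s ≠ "") : pvCleanS s := by
  have ht : PySem.Chars.strip s.toList = s.toList := by
    rw [← PySem.Str.toList_strip]; exact congrArg String.toList h1
  rcases pv_strip_shape s.toList with h0 | hc
  · rw [ht] at h0
    exact absurd (String.toList_inj.mp (by simpa using h0)) h2
  · rw [ht] at hc; exact hc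

-- intercalate helpers
theorem pv_intercalate_cons₂ {α : Type} (sep x y : List α) (zs : List (List α)) :
    List.intercalate sep (x :: y :: zs) = x ++ sep ++ List.intercalate sep (y :: zs) := by
  simp [List.intercalate, List.intersperse_cons₂]

theorem pv_clean_intercalate (sep : List Char) (L : List (List Char))
    (h : ∀ x ∈ L, pvCleanL x) (hne : L ≠ []) : pvCleanL (List.intercalate sep L) := by
  induction L with
  | nil => exact absurd rfl hne
  | cons x zs ih =>
    cases zs with
    | nil =>
      simpa [List.intercalate] using h x (by simp)
    | cons y zs =>
      rw [pv_intercalate_cons₂]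
      have hx := h x (by simp)
      have hrest : pvCleanL (List.intercalate sep (y :: zs)) :=
        ih (fun a ha => h a (List.mem_cons_of_mem _ ha)) (by simp)
      refine ⟨by simp [hx.1], ?_, ?_⟩
      · rw [List.append_assoc]
        obtain ⟨c, cs', hcs⟩ := List.exists_cons_of_ne_nil hx.1
        rw [hcs, List.cons_append]
        simpa [hcs] using hx.2.1
      · obtain ⟨ys, e, hye⟩ := ((List.intercalate sep (y :: zs)).eq_nil_or_concat).resolve_left hrest.1
        rw [List.concat_eq_append] at hye
        rw [hye, show x ++ sep ++ (ys ++ [e]) = (x ++ sep ++ ys) ++ [e] by simp,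
          List.getLastD_concat]
        rw [hye] at hrest
        simpa [List.getLastD_concat] using hrest.2.2

theorem pv_map_intersperse {α β : Type} (f : α → β) (sep : α) (L : List α) :
    (List.intersperse sep L).map f = List.intersperse (f sep) (L.map f) := by
  induction L with
  | nil => simp
  | cons x zs ih =>
    cases zs with
    | nil => simp
    | cons y zs =>
      simp only [List.intersperse_cons₂, List.map_cons, ih]

theorem pv_intercalate_intersperse (sep : List Char) (L : List (List Char)) :
    List.intercalate sep (List.intersperse [] L) = List.intercalate (sep ++ sep) L := by
  induction L with
  | nil => simp [List.intercalate]
  | cons x zs ih =>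
    cases zs with
    | nil => simp [List.intercalate]
    | cons y zs =>
      rw [List.intersperse_cons₂]
      have hsh : ∃ t, List.intersperse ([] : List Char) (y :: zs) = y :: t := by
        cases zs with
        | nil => exact ⟨[], by simp⟩
        | cons z zs' => exact ⟨[] :: List.intersperse [] (z :: zs'), List.intersperse_cons₂⟩
      obtain ⟨t, ht⟩ := hsh
      rw [ht, pv_intercalate_cons₂, pv_intercalate_cons₂, ← ht, ih, pv_intercalate_cons₂]
      simp

theorem pv_intercalate_blank_cons (sep : List Char) (M : List (List Char)) (h : M ≠ []) :
    List.intercalate sep ([] :: M) = sep ++ List.intercalate sep M := by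
  cases M with
  | nil => exact absurd rfl h
  | cons m ms => rw [pv_intercalate_cons₂]; simp

theorem pv_intercalate_blank_concat (sep : List Char) (M : List (List Char)) (h : M ≠ []) :
    List.intercalate sep (M ++ [[]]) = List.intercalate sep M ++ sep := by
  induction M with
  | nil => exact absurd rfl h
  | cons x zs ih =>
    cases zs with
    | nil => simp [List.intercalate]
    | cons y zs =>
      have h1 : (x :: y :: zs) ++ [([] : List Char)] = x :: y :: (zs ++ [[]]) := rfl
      rw [h1, pv_intercalate_cons₂]
      have h2 : y :: (zs ++ [([] : List Char)]) = (y :: zs) ++ [[]] := rfl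
      rw [h2, ih (by simp), pv_intercalate_cons₂]
      simp

theorem pvCleanS_join (run : List String) (h : ∀ x ∈ run, pvCleanS x) (hne : run ≠ []) :
    pvCleanS (PySem.Str.join " " run) := by
  unfold pvCleanS
  rw [PySem.Str.toList_join]
  have : (" ".toList) = [' '] := by decide
  rw [this, PySem.Chars.join]
  apply pv_clean_intercalate
  · intro x hx
    obtain ⟨a, ha, rfl⟩ := List.mem_map.mp hx
    exact h a ha
  · simpa using hne

theorem pvSP_clean (s : String) (h : pvCleanS s) : pvSP s = s := by
  apply String.toList_inj.mp
  simp only [pvSP]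
  rw [PySem.Str.toList_strip]
  exact pv_strip_clean _ h

theorem pvTakeRun_cons_ne (l : String) (ls : List String) (hl : ¬l = "") :
    pvTakeRun (l :: ls) = (l :: (pvTakeRun ls).1, (pvTakeRun ls).2) := by
  simp [pvTakeRun, hl]

-- the central structure lemma
theorem pv_main (n : Nat) : ∀ (sls : List String), sls.length ≤ n →
    (∀ x ∈ sls, pvSP x = x) →
    ∃ lead trail : Bool,
      pvColl false (pvG [] sls) = pvOptB lead ++ List.intersperse "" (pvParagraphs sls) ++ pvOptB trail ∧
      pvColl true (pvG [] sls) = List.intersperse "" (pvParagraphs sls) ++ pvOptB trail ∧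
      (pvParagraphs sls = [] → trail = false) := by
  induction n with
  | zero =>
    intro sls hlen _
    have : sls = [] := List.eq_nil_of_length_eq_zero (Nat.le_zero.mp hlen)
    subst this
    exact ⟨false, false, by simp [pvG, pvColl, pvFlush, pvParagraphs, pvOptB],
      by simp [pvG, pvColl, pvFlush, pvParagraphs, pvOptB], fun _ => rfl⟩
  | succ n ih =>
    intro sls hlen hstr
    cases sls with
    | nil =>
      exact ⟨false, false, by simp [pvG, pvColl, pvFlush, pvParagraphs, pvOptB],
        by simp [pvG, pvColl, pvFlush, pvParagraphs, pvOptB], fun _ => rfl⟩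
    | cons l ls =>
      by_cases hl : l = ""
      · subst hl
        have hg : pvG [] ("" :: ls) = "" :: pvG [] ls := by simp [pvG, pvFlush]
        have hpar : pvParagraphs ("" :: ls) = pvParagraphs ls := by simp [pvParagraphs]
        obtain ⟨lead, trail, h1, h2, h3⟩ := ih ls (by simpa using Nat.le_of_succ_le_succ hlen)
          (fun x hx => hstr x (List.mem_cons_of_mem _ hx))
        refine ⟨true, trail, ?_, ?_, ?_⟩
        · rw [hg]
          have hcf : pvColl false ("" :: pvG [] ls) = "" :: pvColl true (pvG [] ls) := by
            simp [pvColl]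
          rw [hcf, h2, hpar]
          simp [pvOptB]
        · rw [hg]
          have hct : pvColl true ("" :: pvG [] ls) = pvColl true (pvG [] ls) := by
            simp [pvColl]
          rw [hct, h2, hpar]
        · rw [hpar]; exact h3
      · have htr := pvTakeRun_cons_ne l ls hl
        have happ := pvTakeRun_append (l :: ls)
        have hrun_ne : (pvTakeRun (l :: ls)).1 ≠ [] := by rw [htr]; simp
        have hG : pvG [] (l :: ls) = pvG (pvTakeRun (l :: ls)).1 (pvTakeRun (l :: ls)).2 := by
          simpa using pvG_run (l :: ls) []
        have hclean_run : ∀ x ∈ (pvTakeRun (l :: ls)).1, pvCleanS x := by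
          intro x hx
          refine pvCleanS_of_stripped x (hstr x ?_) (pvTakeRun_mem_ne _ x hx)
          rw [← happ]; exact List.mem_append_left _ hx
        have hpa_clean : pvCleanS (PySem.Str.join " " (pvTakeRun (l :: ls)).1) :=
          pvCleanS_join _ hclean_run hrun_ne
        have hpa_ne : (PySem.Str.join " " (pvTakeRun (l :: ls)).1) ≠ "" :=
          pvCleanS_ne _ hpa_clean
        have hpa_ne' : ((PySem.Str.join " " (pvTakeRun (l :: ls)).1) == "") = false := by
          simpa using hpa_ne
        have hflush : pvFlush (pvTakeRun (l :: ls)).1 =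
            [PySem.Str.join " " (pvTakeRun (l :: ls)).1] := by
          have hie : (pvTakeRun (l :: ls)).1.isEmpty = false := by simpa using hrun_ne
          simp only [pvFlush, hie, Bool.false_eq_true, if_false]
          rw [pvSP_clean _ hpa_clean]
        have hpar : pvParagraphs (l :: ls) =
            PySem.Str.join " " (pvTakeRun (l :: ls)).1 :: pvParagraphs (pvTakeRun (l :: ls)).2 := by
          simp [pvParagraphs, hl]
        rcases pvTakeRun_rest (l :: ls) with hre | ⟨t, hre⟩
        · -- the whole list is one run
          have hGfin : pvG [] (l :: ls) = [PySem.Str.join " " (pvTakeRun (l :: ls)).1] := by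
            rw [hG, hre]
            exact hflush
          have hparfin : pvParagraphs (l :: ls) = [PySem.Str.join " " (pvTakeRun (l :: ls)).1] := by
            rw [hpar, hre]
            simp [pvParagraphs]
          refine ⟨false, false, ?_, ?_, ?_⟩
          · rw [hGfin, hparfin]
            simp [pvColl, hpa_ne', pvOptB]
          · rw [hGfin, hparfin]
            simp [pvColl, hpa_ne', pvOptB]
          · intro _; rfl
        · -- the run is followed by a blank line and t
          have hGfin : pvG [] (l :: ls) =
              PySem.Str.join " " (pvTakeRun (l :: ls)).1 :: "" :: pvG [] t := by
            rw [hG, hre]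
            have : pvG (pvTakeRun (l :: ls)).1 ("" :: t) =
                pvFlush (pvTakeRun (l :: ls)).1 ++ [""] ++ pvG [] t := by
              simp [pvG]
            rw [this, hflush]
            simp
          have hlent : t.length ≤ n := by
            have := congrArg List.length happ
            rw [hre, htr] at this
            simp at this hlen
            omega
          have hmemt : ∀ x ∈ t, x ∈ l :: ls := by
            intro x hx
            rw [← happ, hre]
            exact List.mem_append_right _ (List.mem_cons_of_mem _ hx)
          obtain ⟨lead, trail, h1, h2, h3⟩ := ih t hlent (fun x hx => hstr x (hmemt x hx))
          have hparfin : pvParagraphs (l :: ls) =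
              PySem.Str.join " " (pvTakeRun (l :: ls)).1 :: pvParagraphs t := by
            rw [hpar, hre]
            simp [pvParagraphs]
          have hcoll : ∀ b, pvColl b (pvG [] (l :: ls)) =
              PySem.Str.join " " (pvTakeRun (l :: ls)).1 :: "" :: pvColl true (pvG [] t) := by
            intro b
            rw [hGfin]
            simp [pvColl, hpa_ne']
          cases hPt : pvParagraphs t with
          | nil =>
            have htf : trail = false := h3 hPt
            rw [hPt, htf] at h2
            simp [pvOptB] at h2
            refine ⟨false, true, ?_, ?_, ?_⟩
            · rw [hcoll, h2, hparfin, hPt]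
              simp [pvOptB]
            · rw [hcoll, h2, hparfin, hPt]
              simp [pvOptB]
            · intro hp
              rw [hparfin] at hp
              exact absurd hp (by simp)
          | cons p ps' =>
            rw [hPt] at h2
            have hint : List.intersperse ""
                (PySem.Str.join " " (pvTakeRun (l :: ls)).1 :: p :: ps') =
                PySem.Str.join " " (pvTakeRun (l :: ls)).1 :: "" :: List.intersperse "" (p :: ps') :=
              List.intersperse_cons₂
            refine ⟨false, trail, ?_, ?_, ?_⟩
            · rw [hcoll, h2, hparfin, hPt, hint]
              simp [pvOptB]
            · rw [hcoll, h2, hparfin, hPt, hint]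
              simp
            · intro hp
              rw [hparfin] at hp
              exact absurd hp (by simp)

theorem pvParagraphs_clean (n : Nat) : ∀ (sls : List String), sls.length ≤ n →
    (∀ x ∈ sls, pvSP x = x) → ∀ p ∈ pvParagraphs sls, pvCleanS p := by
  induction n with
  | zero =>
    intro sls hlen _
    have : sls = [] := List.eq_nil_of_length_eq_zero (Nat.le_zero.mp hlen)
    subst this
    simp [pvParagraphs]
  | succ n ih =>
    intro sls hlen hstr
    cases sls with
    | nil => simp [pvParagraphs]
    | cons l ls =>
      by_cases hl : l = ""
      · subst hl
        have heq : pvParagraphs ("" :: ls) = pvParagraphs ls := by simp [pvParagraphs]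
        rw [heq]
        exact ih ls (by simpa using Nat.le_of_succ_le_succ hlen)
          (fun x hx => hstr x (List.mem_cons_of_mem _ hx))
      · have heq : pvParagraphs (l :: ls) =
            PySem.Str.join " " (pvTakeRun (l :: ls)).1 :: pvParagraphs (pvTakeRun (l :: ls)).2 := by
          simp [pvParagraphs, hl]
        have happ := pvTakeRun_append (l :: ls)
        have hmemrun : ∀ x ∈ (pvTakeRun (l :: ls)).1, x ∈ l :: ls := by
          intro x hx; rw [← happ]; exact List.mem_append_left _ hx
        have hmemrest : ∀ x ∈ (pvTakeRun (l :: ls)).2, x ∈ l :: ls := by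
          intro x hx; rw [← happ]; exact List.mem_append_right _ hx
        have hrun_ne : (pvTakeRun (l :: ls)).1 ≠ [] := by
          rw [pvTakeRun_cons_ne l ls hl]; simp
        rw [heq]
        intro p hp
        rcases List.mem_cons.mp hp with rfl | hp
        · exact pvCleanS_join _ (fun x hx =>
            pvCleanS_of_stripped x (hstr x (hmemrun x hx)) (pvTakeRun_mem_ne _ x hx)) hrun_ne
        · have hlen2 : (pvTakeRun (l :: ls)).2.length ≤ n := by
            rw [pvTakeRun_cons_ne l ls hl]
            exact le_trans (pvTakeRun_snd_length_le ls) (by simpa using Nat.le_of_succ_le_succ hlen)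
          exact ih _ hlen2 (fun x hx => hstr x (hmemrest x hx)) p hp

-- the final joining lemma
theorem pv_final (lead trail : Bool) (ps : List String) (h : ∀ p ∈ ps, pvCleanS p) :
    PySem.Str.strip (PySem.Str.join "\n" (pvOptB lead ++ List.intersperse "" ps ++ pvOptB trail)) =
    PySem.Str.join "\n\n" ps := by
  apply String.toList_inj.mp
  rw [PySem.Str.toList_strip, PySem.Str.toList_join, PySem.Str.toList_join]
  have hnl : ("\n".toList) = ['\n'] := by decide
  have hnl2 : ("\n\n".toList) = ['\n', '\n'] := by decide
  rw [hnl, hnl2]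
  simp only [PySem.Chars.join]
  rw [List.map_append, List.map_append, pv_map_intersperse]
  rw [show ("".toList) = ([] : List Char) from by decide]
  have hmap : ∀ y ∈ ps.map String.toList, pvCleanL y := by
    intro y hy
    obtain ⟨a, ha, rfl⟩ := List.mem_map.mp hy
    exact h a ha
  cases hps : ps.map String.toList with
  | nil =>
    have : ps = [] := List.map_eq_nil_iff.mp hps
    subst this
    cases lead <;> cases trail <;> simp [pvOptB, List.intercalate] <;> decide
  | cons x xs =>
    rw [← hps]
    have hne : ps.map String.toList ≠ [] := by rw [hps]; simp
    have hK : pvCleanL (List.intercalate ['\n', '\n'] (ps.map String.toList)) :=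
      pv_clean_intercalate _ _ hmap hne
    have hI : List.intersperse ([] : List Char) (ps.map String.toList) ≠ [] := by
      rw [hps]; cases xs <;> simp [List.intersperse_cons₂]
    have hchain : List.intercalate ['\n']
        (List.intersperse ([] : List Char) (ps.map String.toList)) =
        List.intercalate ['\n', '\n'] (ps.map String.toList) := by
      rw [pv_intercalate_intersperse]; rfl
    have hemp : ("".toList) = ([] : List Char) := by decide
    have hoptF : List.map String.toList (pvOptB false) = ([] : List (List Char)) := by
      simp [pvOptB]
    have hoptT : List.map String.toList (pvOptB true) = [([] : List Char)] := by
      simp [pvOptB, hemp]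
    cases lead <;> cases trail
    · rw [hoptF, List.nil_append, List.append_nil, hchain]
      exact pv_strip_clean _ hK
    · rw [hoptF, hoptT, List.nil_append, pv_intercalate_blank_concat _ _ hI, hchain]
      simpa using pv_sandwich 0 1 (List.intercalate ['\n', '\n'] (ps.map String.toList)) (Or.inl hK)
    · rw [hoptT, hoptF, List.append_nil,
        show ([([] : List Char)] ++ List.intersperse ([] : List Char) (ps.map String.toList)) =
          ([] : List Char) :: List.intersperse ([] : List Char) (ps.map String.toList) from rfl,
        pv_intercalate_blank_cons _ _ hI, hchain]
      simpa using pv_sandwich 1 0 (List.intercalate ['\n', '\n'] (ps.map String.toList)) (Or.inl hK)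
    · rw [hoptT, pv_intercalate_blank_concat _ _ (by simp),
        show ([([] : List Char)] ++ List.intersperse ([] : List Char) (ps.map String.toList)) =
          ([] : List Char) :: List.intersperse ([] : List Char) (ps.map String.toList) from rfl,
        pv_intercalate_blank_cons _ _ hI, hchain]
      simpa using pv_sandwich 1 1 (List.intercalate ['\n', '\n'] (ps.map String.toList)) (Or.inl hK)

-- ===== VERDICT (by name: the statement is the Claim_ definition above) =====
theorem unwrap_prose_py_spec : Claim_equal_unwrap_prose_py := by
  intro value _
  unfold Spec_unwrap_prose_py unwrap_prose_py unwrap_prose_py_alt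
  by_cases hv : value == ""
  · rw [if_pos hv, if_pos hv]
  · rw [if_neg hv, if_neg hv]
    have hstr : ∀ x ∈ ((PySem.Str.split? value "\n").getD []).map pvSP, pvSP x = x := by
      intro x hx
      obtain ⟨a, _, rfl⟩ := List.mem_map.mp hx
      exact pv_strip_idem a
    obtain ⟨lead, trail, h1, _, _⟩ :=
      pv_main (((PySem.Str.split? value "\n").getD []).map pvSP).length _ le_rfl hstr
    have hclean := pvParagraphs_clean (((PySem.Str.split? value "\n").getD []).map pvSP).length _
      le_rfl hstr
    calc PySem.Str.strip (PySem.Str.join "\n"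
          ((let st := ((PySem.Str.split? value "\n").getD []).foldl
              (fun (st : List String × List String) line =>
                if PySem.Str.strip line == "" then
                  ((if st.2.isEmpty then st.1
                    else st.1 ++ [PySem.Str.strip (PySem.Str.join " " st.2)]) ++ [""], [])
                else (st.1, st.2 ++ [PySem.Str.strip line])) ([], [])
            if st.2.isEmpty then st.1
            else st.1 ++ [PySem.Str.strip (PySem.Str.join " " st.2)]).foldl
            (fun cleaned line =>
              if line == "" && !cleaned.isEmpty && (cleaned.getLastD "" == "") then cleaned
              else cleaned ++ [line]) []))
        = PySem.Str.strip (PySem.Str.join "\n"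
            (pvColl false (pvG [] (((PySem.Str.split? value "\n").getD []).map pvSP)))) := by
          rw [pvG_spec ((PySem.Str.split? value "\n").getD []) [] [], List.nil_append]
          rw [pvColl_spec (pvG [] (((PySem.Str.split? value "\n").getD []).map pvSP)) []]
          rfl
      _ = PySem.Str.strip (PySem.Str.join "\n"
            (pvOptB lead ++
              List.intersperse "" (pvParagraphs (((PySem.Str.split? value "\n").getD []).map pvSP)) ++
              pvOptB trail)) := by rw [h1]
      _ = PySem.Str.join "\n\n"
            (pvParagraphs (((PySem.Str.split? value "\n").getD []).map pvSP)) :=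
          pv_final lead trail _ hclean
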